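-- pv_equiv track=rewrite | github.com/digirati-co-uk/personalnames | personalnames/names.py | name_split
-- ===== SOURCE A (Python) =====
-- def name_split(name, split_char=","):
--     """
--     Split a name into a list of name parts (not categorised, just an ordered list).
--
--     Retain commas for later use in splitting the list into surname and forename parts.
--
--     :param name: string for personal name
--     :param split_char: character to split on (default to comma)
--     :return: list of strings, including commas.
--     """
--     name_list = []
--     split_split = name.split(split_char)
--     for split_item in split_split[:-1]:
--         [name_list.append(normalise_whitespace(x)) for x in split_item.split()]
--         name_list.append(split_char)
--     [name_list.append(normalise_whitespace(x)) for x in split_split[-1].split()]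
--     return name_list
--
-- def normalise_whitespace(text):
--     """
--     Normalise the whitespace in the string
--
--     :param text: string
--     :return: string with whitespace normalised to single space
--     """
--     return " ".join(text.strip().split())
-- ===== SOURCE B (Python) =====
-- def name_split(name, split_char=","):
--     """Single-pass scanner: walk the string once, emitting split_char occurrences as
--     their own elements and flushing whitespace-separated tokens as they end."""
--     out = []
--     tok = []
--     i, n, k = 0, len(name), len(split_char)
--     while i < n:
--         if k and name.startswith(split_char, i):
--             if tok:
--                 out.append(''.join(tok))
--                 tok = []
--             out.append(split_char)
--             i += k
--         elif name[i].isspace():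
--             if tok:
--                 out.append(''.join(tok))
--                 tok = []
--             i += 1
--         else:
--             tok.append(name[i])
--             i += 1
--     if tok:
--         out.append(''.join(tok))
--     return out
-- ===== Notes on version B (the rewrite author's own statement) =====
-- stated objective: alternative
-- what changed: B replaces A's three staged passes (split on the delimiter, whitespace-split each segment, re-join while re-inserting the delimiter) with one left-to-right character scan that maintains a pending token and emits delimiter matches and completed tokens as it goes.
import Mathlib
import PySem

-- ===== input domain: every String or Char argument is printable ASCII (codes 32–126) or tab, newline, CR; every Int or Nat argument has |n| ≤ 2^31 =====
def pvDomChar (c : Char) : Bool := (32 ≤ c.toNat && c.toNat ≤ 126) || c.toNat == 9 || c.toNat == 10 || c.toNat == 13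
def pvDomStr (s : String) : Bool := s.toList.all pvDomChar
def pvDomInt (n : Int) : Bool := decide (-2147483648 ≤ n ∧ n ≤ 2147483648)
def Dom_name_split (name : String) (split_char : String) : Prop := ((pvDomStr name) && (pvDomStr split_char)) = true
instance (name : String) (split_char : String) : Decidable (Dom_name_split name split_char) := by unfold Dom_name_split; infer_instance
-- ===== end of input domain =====

-- B replaces A's staged passes (split on the delimiter, whitespace-split each segment,
-- re-join re-inserting the delimiter) with a single left-to-right character scan that
-- keeps a pending token and emits delimiter matches and finished tokens as it goes.

-- ===== PORT A =====
def normalise_whitespace (text : String) : String :=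
  PySem.Str.join " " (PySem.Str.split₀ (PySem.Str.strip text))

def name_split (name : String) (split_char : String) : List String :=
  match PySem.Str.split? name split_char with
  | none => []    -- empty split_char: Python raises ValueError here; excluded by Pre_
  | some split_split =>
    let name_list :=
      (PySem.List.slice split_split none (some (-1))).foldl
        (fun name_list split_item =>
          ((PySem.Str.split₀ split_item).foldl
            (fun nl x => nl ++ [normalise_whitespace x]) name_list) ++ [split_char]) []
    (PySem.Str.split₀ ((PySem.List.pyGet? split_split (-1)).getD "")).foldl
      (fun nl x => nl ++ [normalise_whitespace x]) name_list

-- ===== PORT B =====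
-- the while loop of Source B: cs = the unread rest of name, tok = the pending token chars, out = the result so far
def nsScan (sep : List Char) (cs : List Char) (tok : List Char) (out : List String) : List String :=
  match cs with
  | [] => if tok.isEmpty then out else out ++ [String.ofList tok]
  | c :: rest =>
    if h : sep.isEmpty = false ∧ sep.isPrefixOf (c :: rest) = true then
      nsScan sep ((c :: rest).drop sep.length) []
        ((if tok.isEmpty then out else out ++ [String.ofList tok]) ++ [String.ofList sep])
    else if PySem.Chars.isspace c = true then
      nsScan sep rest [] (if tok.isEmpty then out else out ++ [String.ofList tok])
    else
      nsScan sep rest (tok ++ [c]) out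
termination_by cs.length
decreasing_by
  · have hsep : 0 < sep.length := by
      cases sep with
      | nil => simp at h
      | cons a l => simp
    simp only [List.length_drop, List.length_cons]
    omega
  · simp
  · simp

def name_split_alt (name : String) (split_char : String) : List String :=
  nsScan split_char.toList name.toList [] []

-- ===== PRECONDITION & SPEC =====
-- Pre_ excludes only an empty split_char, on which Python's str.split raises ValueError in A.
def Pre_name_split (name : String) (split_char : String) : Prop := split_char ≠ ""
instance (name : String) (split_char : String) : Decidable (Pre_name_split name split_char) := by
  unfold Pre_name_split; infer_instance

def pvWitness_name_split : String × String := ("Smith,  John  H.", ",")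

def Spec_name_split (name : String) (split_char : String) (out : List String) : Prop :=
  out = name_split_alt name split_char
instance (name : String) (split_char : String) (out : List String) : Decidable (Spec_name_split name split_char out) := by
  unfold Spec_name_split; infer_instance

-- ===== CLAIM (what is proved, stated in full; the proofs are below) =====
def Claim_equal_name_split : Prop := ∀ (name : String) (split_char : String), Dom_name_split name split_char → Pre_name_split name split_char → Spec_name_split name split_char (name_split name split_char)

-- ===== LEMMAS AND PROOFS =====

-- ---- A-side: normalise_whitespace is the identity on whitespace-split tokens ----

-- every token produced by Python's whitespace split is nonempty and whitespace-free
theorem pv_go_tokens (s : List Char) : ∀ (cur : List Char) (acc : List (List Char)),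
    (∀ c ∈ cur, PySem.Chars.isspace c = false) →
    (∀ t ∈ acc, t ≠ [] ∧ ∀ c ∈ t, PySem.Chars.isspace c = false) →
    ∀ t ∈ PySem.Chars.split₀.go s cur acc, t ≠ [] ∧ ∀ c ∈ t, PySem.Chars.isspace c = false := by
  induction s with
  | nil =>
    intro cur acc hcur hacc t ht
    simp only [PySem.Chars.split₀.go] at ht
    split at ht
    · simp only [List.mem_reverse] at ht; exact hacc t ht
    · simp only [List.reverse_cons] at ht
      rcases List.mem_append.1 ht with h | h
      · exact hacc t (List.mem_reverse.1 h)
      · simp only [List.mem_singleton] at h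
        subst h
        rename_i hne
        constructor
        · simp only [List.isEmpty_iff] at hne
          simpa using hne
        · intro c hc; exact hcur c (List.mem_reverse.1 hc)
  | cons a rest ih =>
    intro cur acc hcur hacc t ht
    simp only [PySem.Chars.split₀.go] at ht
    by_cases hsp : PySem.Chars.isspace a = true
    · rw [if_pos hsp] at ht
      by_cases hce : cur.isEmpty = true
      · rw [if_pos hce] at ht
        exact ih [] acc (by simp) hacc t ht
      · rw [if_neg hce] at ht
        refine ih [] (cur.reverse :: acc) (by simp) ?_ t ht
        intro u hu
        rcases List.mem_cons.1 hu with h | h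
        · subst h
          refine ⟨by simp only [List.isEmpty_iff] at hce; simpa using hce, ?_⟩
          intro c hc; exact hcur c (List.mem_reverse.1 hc)
        · exact hacc u h
    · rw [if_neg hsp] at ht
      refine ih (a :: cur) acc ?_ hacc t ht
      intro c hc
      rcases List.mem_cons.1 hc with h | h
      · subst h; simpa using hsp
      · exact hcur c h

theorem pv_split₀_tokens (s : List Char) :
    ∀ t ∈ PySem.Chars.split₀ s, t ≠ [] ∧ ∀ c ∈ t, PySem.Chars.isspace c = false := by
  intro t ht
  exact pv_go_tokens s [] [] (by simp) (by simp) t ht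

theorem pv_strip_id (x : List Char) (h : ∀ c ∈ x, PySem.Chars.isspace c = false) :
    PySem.Chars.strip x = x := by
  have hl : ∀ (y : List Char), (∀ c ∈ y, PySem.Chars.isspace c = false) →
      List.dropWhile PySem.Chars.isspace y = y := by
    intro y hy
    cases y with
    | nil => rfl
    | cons a l => simp [hy a (by simp)]
  unfold PySem.Chars.strip PySem.Chars.lstrip PySem.Chars.rstrip
  rw [hl x h, hl x.reverse (by intro c hc; exact h c (List.mem_reverse.1 hc)), List.reverse_reverse]

-- whitespace-split of a whitespace-free string is the string itself
theorem pv_go_nospace (s : List Char) : ∀ (cur : List Char) (acc : List (List Char)),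
    (∀ c ∈ s, PySem.Chars.isspace c = false) →
    PySem.Chars.split₀.go s cur acc =
      if cur.reverse ++ s = [] then acc.reverse else acc.reverse ++ [cur.reverse ++ s] := by
  induction s with
  | nil =>
    intro cur acc _
    simp only [PySem.Chars.split₀.go, List.append_nil]
    by_cases hc : cur.isEmpty = true
    · rw [if_pos hc, if_pos (by simpa [List.isEmpty_iff] using hc)]
    · rw [if_neg hc, if_neg (by simp only [List.isEmpty_iff] at hc; simpa using hc)]
      simp
  | cons a rest ih =>
    intro cur acc hs
    simp only [PySem.Chars.split₀.go]
    rw [if_neg (by simp [hs a (by simp)])]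
    rw [ih (a :: cur) acc (fun c hc => hs c (by simp [hc]))]
    simp

theorem pv_split₀_singleton (x : List Char) (hne : x ≠ [])
    (h : ∀ c ∈ x, PySem.Chars.isspace c = false) : PySem.Chars.split₀ x = [x] := by
  unfold PySem.Chars.split₀
  rw [pv_go_nospace x [] [] h]
  simp [hne]

theorem pv_normalise_token (t : String) (hne : t.toList ≠ [])
    (h : ∀ c ∈ t.toList, PySem.Chars.isspace c = false) : normalise_whitespace t = t := by
  unfold normalise_whitespace
  unfold PySem.Str.join PySem.Str.split₀ PySem.Str.strip
  rw [pv_strip_id _ h]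
  simp only [String.toList_ofList]
  rw [pv_split₀_singleton _ hne h]
  simp [PySem.Chars.join_singleton]

theorem pv_map_normalise (seg : String) :
    (PySem.Str.split₀ seg).map normalise_whitespace = PySem.Str.split₀ seg := by
  unfold PySem.Str.split₀
  rw [List.map_map]
  apply List.map_congr_left
  intro t ht
  have h := pv_split₀_tokens seg.toList t ht
  simp only [Function.comp_apply]
  rw [pv_normalise_token (String.ofList t) (by simpa using h.1) (by simpa using h.2)]

-- A's delimiter-after-each-leading-segment layout as one flatMap
theorem pv_main_list (sc : String) (toks : String → List String) (h0 : toks "" = [])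
    (segs : List String) :
    (segs.dropLast.flatMap fun s => toks s ++ [sc]) ++ toks ((segs.getLast?).getD "")
      = ((segs.map toks)[0]?.getD []) ++ (segs.map toks).tail.flatMap (fun t => [sc] ++ t) := by
  cases segs with
  | nil => simp [h0]
  | cons p rest =>
    induction rest generalizing p with
    | nil => simp
    | cons q rs ih =>
      have hthis := ih q
      simp only [List.map_cons, List.getElem?_cons_zero, Option.getD_some, List.tail_cons] at hthis
      rw [show (p :: q :: rs).dropLast = p :: (q :: rs).dropLast from rfl]
      simp only [List.flatMap_cons]
      rw [List.getLast?_cons_cons, List.append_assoc, List.append_assoc, hthis]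
      simp

-- ---- splitOn.go bookkeeping ----

theorem pv_splitOn_go_acc (sep : List Char) : ∀ (fuel : Nat) (l cur : List Char) (acc : List (List Char)),
    PySem.Chars.splitOn.go sep fuel l cur acc = acc.reverse ++ PySem.Chars.splitOn.go sep fuel l cur [] := by
  intro fuel
  induction fuel with
  | zero => intro l cur acc; simp [PySem.Chars.splitOn.go]
  | succ n ih =>
    intro l cur acc
    cases l with
    | nil => simp [PySem.Chars.splitOn.go]
    | cons c rest =>
      simp only [PySem.Chars.splitOn.go]
      by_cases hp : sep.isPrefixOf (c :: rest) = true
      · rw [if_pos hp, if_pos hp, ih _ _ (cur.reverse :: acc), ih _ _ [cur.reverse]]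
        simp
      · rw [if_neg hp, if_neg hp, ih rest (c :: cur) acc]

theorem pv_splitOn_go_cur (sep : List Char) : ∀ (fuel : Nat) (l cur : List Char),
    ∃ h t, PySem.Chars.splitOn.go sep fuel l [] [] = h :: t ∧
      PySem.Chars.splitOn.go sep fuel l cur [] = (cur.reverse ++ h) :: t := by
  intro fuel
  induction fuel with
  | zero => intro l cur; exact ⟨l, [], by simp [PySem.Chars.splitOn.go]⟩
  | succ n ih =>
    intro l cur
    cases l with
    | nil => exact ⟨[], [], by simp [PySem.Chars.splitOn.go]⟩
    | cons c rest =>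
      by_cases hp : sep.isPrefixOf (c :: rest) = true
      · refine ⟨[], PySem.Chars.splitOn.go sep n ((c :: rest).drop sep.length) [] [], ?_, ?_⟩
        · simp only [PySem.Chars.splitOn.go]
          rw [if_pos hp, pv_splitOn_go_acc sep n _ [] [List.reverse []]]
          simp
        · simp only [PySem.Chars.splitOn.go]
          rw [if_pos hp, pv_splitOn_go_acc sep n _ [] [cur.reverse]]
          simp
      · obtain ⟨h, t, h1, h2⟩ := ih rest (c :: cur)
        obtain ⟨h', t', h1', h2'⟩ := ih rest [c]
        -- relate the two instantiations: both come from splitOn.go sep n rest [] []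
        rw [h1] at h1'
        injection h1' with e1 e2
        subst e1; subst e2
        refine ⟨c :: h, t, ?_, ?_⟩
        · simp only [PySem.Chars.splitOn.go]
          rw [if_neg hp, h2']
          simp
        · simp only [PySem.Chars.splitOn.go]
          rw [if_neg hp, h2]
          simp

theorem pv_splitOn_go_fuel (sep : List Char) (hsep : sep ≠ []) :
    ∀ (fuel₁ : Nat) (fuel₂ : Nat) (l cur : List Char), l.length < fuel₁ → l.length < fuel₂ →
    PySem.Chars.splitOn.go sep fuel₁ l cur [] = PySem.Chars.splitOn.go sep fuel₂ l cur [] := by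
  intro fuel₁
  induction fuel₁ with
  | zero => intro fuel₂ l cur h1 _; omega
  | succ n ih =>
    intro fuel₂ l cur h1 h2
    cases fuel₂ with
    | zero => omega
    | succ m =>
      cases l with
      | nil => simp [PySem.Chars.splitOn.go]
      | cons c rest =>
        have hsl : 0 < sep.length := List.length_pos_of_ne_nil hsep
        simp only [PySem.Chars.splitOn.go]
        by_cases hp : sep.isPrefixOf (c :: rest) = true
        · rw [if_pos hp, if_pos hp,
            pv_splitOn_go_acc sep n _ [] [List.reverse cur],
            pv_splitOn_go_acc sep m _ [] [List.reverse cur]]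
          have hd : ((c :: rest).drop sep.length).length < n := by
            simp only [List.length_cons] at h1
            simp only [List.length_drop, List.length_cons]
            omega
          have hd2 : ((c :: rest).drop sep.length).length < m := by
            simp only [List.length_cons] at h2
            simp only [List.length_drop, List.length_cons]
            omega
          rw [ih m _ [] hd hd2]
        · rw [if_neg hp, if_neg hp]
          exact ih m rest (c :: cur) (by simp at h1 ⊢; omega) (by simp at h2 ⊢; omega)

theorem pv_splitOn_nil (sep : List Char) : PySem.Chars.splitOn [] sep = [[]] := rfl

theorem pv_splitOn_prefix (sep : List Char) (hsep : sep ≠ []) (l : List Char)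
    (hp : sep.isPrefixOf l = true) :
    PySem.Chars.splitOn l sep = [] :: PySem.Chars.splitOn (l.drop sep.length) sep := by
  have hsl : 0 < sep.length := List.length_pos_of_ne_nil hsep
  cases l with
  | nil =>
    exfalso
    cases sep with
    | nil => exact hsep rfl
    | cons a s => simp [List.isPrefixOf] at hp
  | cons c rest =>
    show PySem.Chars.splitOn.go sep ((c :: rest).length + 1) (c :: rest) [] [] = _
    simp only [PySem.Chars.splitOn.go]
    rw [if_pos hp, pv_splitOn_go_acc sep _ _ [] [List.reverse []]]
    have hlen : ((c :: rest).drop sep.length).length < (c :: rest).length := by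
      simp only [List.length_drop, List.length_cons]
      omega
    rw [pv_splitOn_go_fuel sep hsep _ (((c :: rest).drop sep.length).length + 1) _ []
      (by omega) (by omega)]
    rfl

theorem pv_splitOn_not_prefix (sep : List Char) (c : Char) (rest : List Char)
    (hp : ¬ sep.isPrefixOf (c :: rest) = true) :
    ∃ h t, PySem.Chars.splitOn rest sep = h :: t ∧
      PySem.Chars.splitOn (c :: rest) sep = (c :: h) :: t := by
  obtain ⟨h, t, h1, h2⟩ := pv_splitOn_go_cur sep (rest.length + 1) rest [c]
  refine ⟨h, t, h1, ?_⟩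
  show PySem.Chars.splitOn.go sep ((c :: rest).length + 1) (c :: rest) [] [] = _
  simp only [PySem.Chars.splitOn.go, List.length_cons]
  rw [if_neg hp, h2]
  rfl

theorem pv_splitOn_ne_nil (sep l : List Char) : ∃ h t, PySem.Chars.splitOn l sep = h :: t := by
  obtain ⟨h, t, h1, _⟩ := pv_splitOn_go_cur sep (l.length + 1) l []
  exact ⟨h, t, h1⟩

-- ---- split₀.go bookkeeping ----

theorem pv_split₀_go_acc (s : List Char) : ∀ (cur : List Char) (acc : List (List Char)),
    PySem.Chars.split₀.go s cur acc = acc.reverse ++ PySem.Chars.split₀.go s cur [] := by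
  induction s with
  | nil =>
    intro cur acc
    simp only [PySem.Chars.split₀.go]
    by_cases hc : cur.isEmpty = true
    · rw [if_pos hc, if_pos hc]; simp
    · rw [if_neg hc, if_neg hc]; simp
  | cons a rest ih =>
    intro cur acc
    simp only [PySem.Chars.split₀.go]
    by_cases hsp : PySem.Chars.isspace a = true
    · rw [if_pos hsp, if_pos hsp]
      by_cases hc : cur.isEmpty = true
      · rw [if_pos hc, if_pos hc, ih [] acc]
      · rw [if_neg hc, if_neg hc, ih [] (cur.reverse :: acc), ih [] [cur.reverse]]
        simp
    · rw [if_neg hsp, if_neg hsp, ih (a :: cur) acc]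

-- ---- the scanner computes A's token list, one segment at a time ----

-- the value the scanner still has to produce: pending token tok, unread input cs
def nsSpec (sep : List Char) (tok : List Char) (cs : List Char) : List String :=
  match PySem.Chars.splitOn cs sep with
  | [] => []
  | h :: t =>
      (PySem.Chars.split₀.go h tok.reverse []).map String.ofList
        ++ t.flatMap (fun s => String.ofList sep :: (PySem.Chars.split₀ s).map String.ofList)

theorem pv_nsSpec_eq (sep tok : List Char) (cs : List Char) (h : List Char) (t : List (List Char))
    (hc : PySem.Chars.splitOn cs sep = h :: t) :
    nsSpec sep tok cs
      = (PySem.Chars.split₀.go h tok.reverse []).map String.ofList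
        ++ t.flatMap (fun s => String.ofList sep :: (PySem.Chars.split₀ s).map String.ofList) := by
  rw [nsSpec, hc]

theorem pv_flush (tok : List Char) (out : List String) :
    (if tok.isEmpty then out else out ++ [String.ofList tok])
      = out ++ (PySem.Chars.split₀.go [] tok.reverse []).map String.ofList := by
  simp only [PySem.Chars.split₀.go]
  cases tok with
  | nil => simp
  | cons a l => simp

theorem pv_scan_spec (sep : List Char) (hsep : sep ≠ []) :
    ∀ (n : Nat) (cs : List Char), cs.length ≤ n → ∀ (tok : List Char) (out : List String),
    nsScan sep cs tok out = out ++ nsSpec sep tok cs := by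
  intro n
  induction n with
  | zero =>
    intro cs hn tok out
    have : cs = [] := List.eq_nil_of_length_eq_zero (by omega)
    subst this
    rw [nsScan, pv_nsSpec_eq sep tok [] [] [] (pv_splitOn_nil sep)]
    rw [pv_flush tok out]
    simp
  | succ m ih =>
    intro cs hn tok out
    cases cs with
    | nil =>
      rw [nsScan, pv_nsSpec_eq sep tok [] [] [] (pv_splitOn_nil sep)]
      rw [pv_flush tok out]
      simp
    | cons c rest =>
      have hse : sep.isEmpty = false := by
        cases sep with
        | nil => exact absurd rfl hsep
        | cons a s => rfl
      have hsl : 0 < sep.length := List.length_pos_of_ne_nil hsep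
      rw [nsScan]
      by_cases hp : sep.isPrefixOf (c :: rest) = true
      · rw [dif_pos ⟨hse, hp⟩]
        have hd : ((c :: rest).drop sep.length).length ≤ m := by
          simp only [List.length_drop, List.length_cons]
          simp only [List.length_cons] at hn
          omega
        obtain ⟨h', t', hst⟩ := pv_splitOn_ne_nil sep ((c :: rest).drop sep.length)
        rw [pv_nsSpec_eq sep tok (c :: rest) [] (h' :: t')
          (by rw [pv_splitOn_prefix sep hsep _ hp, hst])]
        rw [ih _ hd [] _, pv_nsSpec_eq sep [] _ h' t' hst]
        rw [pv_flush tok out]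
        simp only [PySem.Chars.split₀.go, List.reverse_nil, List.isEmpty_nil, if_pos rfl,
          List.flatMap_cons, PySem.Chars.split₀]
        simp
      · rw [dif_neg (by intro hc; exact hp hc.2)]
        obtain ⟨h, t, h1, h2⟩ := pv_splitOn_not_prefix sep c rest hp
        by_cases hsp : PySem.Chars.isspace c = true
        · rw [if_pos hsp]
          rw [pv_nsSpec_eq sep tok (c :: rest) (c :: h) t h2]
          rw [ih rest (by simp at hn; omega) [] _, pv_nsSpec_eq sep [] rest h t h1]
          rw [pv_flush tok out]
          rw [show PySem.Chars.split₀.go (c :: h) tok.reverse []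
            = if tok.reverse.isEmpty then PySem.Chars.split₀.go h [] []
              else PySem.Chars.split₀.go h [] [tok.reverse.reverse] by
                simp only [PySem.Chars.split₀.go, if_pos hsp]]
          cases htok : tok.isEmpty with
          | true =>
            have : tok = [] := by simpa [List.isEmpty_iff] using htok
            subst this
            rw [show PySem.Chars.split₀.go [] (List.reverse []) [] = ([] : List (List Char)) from rfl]
            simp [PySem.Chars.split₀]
          | false =>
            have hne : tok ≠ [] := by simpa [List.isEmpty_iff] using htok
            have hre : tok.reverse.isEmpty = false := by
              simp [List.isEmpty_iff, hne]
            rw [hre, if_neg (by simp)]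
            rw [pv_split₀_go_acc h [] [tok.reverse.reverse]]
            rw [show PySem.Chars.split₀.go [] tok.reverse [] = [tok] by
              simp only [PySem.Chars.split₀.go]
              rw [if_neg (by simp [hne])]
              simp]
            simp [PySem.Chars.split₀]
        · rw [if_neg hsp]
          rw [pv_nsSpec_eq sep tok (c :: rest) (c :: h) t h2]
          rw [ih rest (by simp at hn; omega) (tok ++ [c]) out, pv_nsSpec_eq sep (tok ++ [c]) rest h t h1]
          rw [show PySem.Chars.split₀.go (c :: h) tok.reverse []
            = PySem.Chars.split₀.go h (c :: tok.reverse) [] by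
                simp only [PySem.Chars.split₀.go, if_neg hsp]]
          simp

-- ===== VERDICT (by name: the statement is the Claim_ definition above) =====
theorem name_split_spec : Claim_equal_name_split := by
  intro name split_char _ hpre
  unfold Spec_name_split name_split name_split_alt
  have hsl : split_char.toList ≠ [] := by
    intro h
    apply hpre
    have := congrArg String.ofList h
    simpa using this
  have hsome : PySem.Chars.split? name.toList split_char.toList
      = some (PySem.Chars.splitOn name.toList split_char.toList) := by
    unfold PySem.Chars.split?
    rw [if_neg (by simpa [List.isEmpty_iff] using hsl)]
  cases hs : PySem.Str.split? name split_char with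
  | none =>
    exfalso
    unfold PySem.Str.split? at hs
    rw [hsome] at hs
    simp at hs
  | some segs =>
    -- reduce A to the flatMap normal form
    simp only [PySem.List.slice_to_neg_one, PySem.List.pyGet?_neg_one,
      PySem.List.slice_from_one]
    have hinner : ∀ (nl : List String) (item : String),
        (PySem.Str.split₀ item).foldl (fun nl x => nl ++ [normalise_whitespace x]) nl
          = nl ++ PySem.Str.split₀ item := by
      intro nl item
      rw [PySem.List.foldl_append_singleton_eq_map, pv_map_normalise]
    have hA : (fun (name_list : List String) split_item =>
        ((PySem.Str.split₀ split_item).foldl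
          (fun nl x => nl ++ [normalise_whitespace x]) name_list) ++ [split_char])
        = fun nl item => nl ++ (PySem.Str.split₀ item ++ [split_char]) := by
      funext nl item
      rw [hinner, List.append_assoc]
    rw [hA, hinner, PySem.List.foldl_append_eq_flatMap, List.nil_append]
    have h0 : PySem.Str.split₀ "" = [] := rfl
    rw [pv_main_list split_char PySem.Str.split₀ h0 segs]
    -- identify segs with the char-level splitOn
    have hsegs : segs = (PySem.Chars.splitOn name.toList split_char.toList).map String.ofList := by
      unfold PySem.Str.split? at hs
      rw [hsome] at hs
      simpa using hs.symm
    -- reduce B to the same form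
    obtain ⟨h, t, hL⟩ := pv_splitOn_ne_nil split_char.toList name.toList
    rw [pv_scan_spec split_char.toList hsl name.toList.length name.toList (le_refl _) [] []]
    rw [pv_nsSpec_eq split_char.toList [] name.toList h t hL]
    rw [hsegs, hL]
    have hofsc : String.ofList split_char.toList = split_char := by simp
    have hsplit₀ : ∀ (s : List Char),
        PySem.Str.split₀ (String.ofList s) = (PySem.Chars.split₀ s).map String.ofList := by
      intro s
      unfold PySem.Str.split₀
      simp
    simp only [List.map_cons, List.getElem?_cons_zero, Option.getD_some, List.tail_cons,
      List.map_map, List.flatMap_map, Function.comp_apply, hsplit₀, hofsc, List.nil_append]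
    simp [PySem.Chars.split₀]
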